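-- pv_equiv track=rewrite | github.com/coco-in-bluemoon/programmers-challenges | 2020 카카오 인턴십/동굴 탐험.py | solution
-- ===== SOURCE A (Python) =====
-- from collections import defaultdict
--
-- def dfs(u, graph, conditions, delayed, visited):
--     if u in visited:
--         return
--
--     if u in conditions.keys() and conditions[u] not in visited:
--         delayed[conditions[u]].add(u)
--         return
--
--     visited.add(u)
--
--     for v in delayed[u]:
--         dfs(v, graph, conditions, delayed, visited)
--     delayed.pop(u)
--
--     for v in graph[u]:
--         dfs(v, graph, conditions, delayed, visited)
--
-- def solution(n, path, order):
--     graph = defaultdict(set)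
--     for u, v in path:
--         graph[u].add(v)
--         graph[v].add(u)
--
--     conditions = defaultdict(str)
--     for prev, next in order:
--         conditions[next] = prev
--
--     visited = set()
--     delayed = defaultdict(set)
--     dfs(0, graph, conditions, delayed, visited)
--
--     return len(visited) == n
-- ===== SOURCE B (Python) =====
-- from collections import defaultdict
--
--
-- def solution(n, path, order):
--     graph = defaultdict(set)
--     for u, v in path:
--         graph[u].add(v)
--         graph[v].add(u)
--
--     conditions = defaultdict(str)
--     for prev, next in order:
--         conditions[next] = prev
--
--     # Chaotic iteration: sweep the candidate nodes repeatedly, adding every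
--     # node that is 0 or adjacent to a visited node and whose precondition
--     # (if any) is already visited.  The visited set grows monotonically and
--     # stabilises within len(nodes) + 1 sweeps at the same least fixpoint the
--     # recursive delayed-bucket DFS computes.
--     nodes = [0] + [x for e in path for x in e]
--     visited = set()
--     for _ in range(len(nodes) + 1):
--         for v in nodes:
--             if v in visited:
--                 continue
--             if v != 0 and not any(u in visited for u in graph[v]):
--                 continue
--             if v in conditions.keys() and conditions[v] not in visited:
--                 continue
--             visited.add(v)
--
--     return len(visited) == n
-- ===== Notes on version B (the rewrite author's own statement) =====
-- stated objective: alternative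
-- what changed: Replaces the recursive delayed-bucket DFS with a bounded chaotic-iteration fixpoint: repeatedly sweep the candidate node list, adding every node that is 0 or adjacent to a visited node and whose order-condition (if any) is visited; the visited set stabilises at the same least fixpoint, and the delayed defaultdict and recursion disappear.
import Mathlib
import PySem

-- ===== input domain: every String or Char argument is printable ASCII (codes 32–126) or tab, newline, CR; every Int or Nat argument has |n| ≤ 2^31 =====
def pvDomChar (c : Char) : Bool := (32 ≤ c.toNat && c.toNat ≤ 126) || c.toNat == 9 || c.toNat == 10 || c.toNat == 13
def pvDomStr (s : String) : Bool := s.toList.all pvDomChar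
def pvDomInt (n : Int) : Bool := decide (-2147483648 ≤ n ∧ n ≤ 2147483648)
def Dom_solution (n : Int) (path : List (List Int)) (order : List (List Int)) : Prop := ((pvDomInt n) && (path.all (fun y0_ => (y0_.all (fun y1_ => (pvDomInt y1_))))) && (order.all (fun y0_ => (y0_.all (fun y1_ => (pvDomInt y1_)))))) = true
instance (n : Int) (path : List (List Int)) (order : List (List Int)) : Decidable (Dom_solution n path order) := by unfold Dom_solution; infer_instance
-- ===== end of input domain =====

-- B replaces A's recursive delayed-bucket DFS by a bounded chaotic-iteration fixpoint
-- (repeated sweeps over the candidate nodes); same return value, no speed claim.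

-- ===== PORT A =====
-- graph = defaultdict(set); for u, v in path: graph[u].add(v); graph[v].add(u)
def buildGraphA (path : List (List Int)) : PySem.Dict Int (PySem.Set Int) :=
  path.foldl (fun g e =>
    match e with
    | [u, v] =>
      let g := g.insert u (PySem.Set.add (g.getD u PySem.Set.empty) v)
      g.insert v (PySem.Set.add (g.getD v PySem.Set.empty) u)
    | _ => g) PySem.Dict.empty

-- conditions = defaultdict(str); for prev, next in order: conditions[next] = prev
def buildCondsA (order : List (List Int)) : PySem.Dict Int Int :=
  order.foldl (fun c e =>
    match e with
    | [prev, next] => c.insert next prev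
    | _ => c) PySem.Dict.empty

-- the recursive dfs of A, on state (delayed, visited); fuel is only a structural
-- termination guard: A's recursion depth is bounded by the number of distinct
-- nodes, and solution below passes fuel exceeding that bound.
def dfsA (g : PySem.Dict Int (PySem.Set Int)) (c : PySem.Dict Int Int) :
    Nat → Int → PySem.Dict Int (PySem.Set Int) × PySem.Set Int →
    PySem.Dict Int (PySem.Set Int) × PySem.Set Int
  | 0, _, st => st
  | fuel+1, u, (dl, vis) =>
    if vis.contains u then (dl, vis)
    else
      -- 'if u in conditions.keys() and conditions[u] not in visited'
      match (c.get? u).filter (fun p => !vis.contains p) with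
      | some p => (dl.insert p (PySem.Set.add (dl.getD p PySem.Set.empty) u), vis)
      | none =>
        let vis1 := PySem.Set.add vis u
        -- for v in delayed[u]: dfs(v, …)
        let st1 := (dl.getD u PySem.Set.empty).foldl (fun st v => dfsA g c fuel v st) (dl, vis1)
        -- delayed.pop(u)
        let st2 := (st1.1.erase u, st1.2)
        -- for v in graph[u]: dfs(v, …)
        (g.getD u PySem.Set.empty).foldl (fun st v => dfsA g c fuel v st) st2

def solution (n : Int) (path : List (List Int)) (order : List (List Int)) : Bool :=
  let graph := buildGraphA path
  let conditions := buildCondsA order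
  let st := dfsA graph conditions (path.flatten.length + 2) 0 (PySem.Dict.empty, PySem.Set.empty)
  PySem.Set.len st.2 == n

-- ===== PORT B =====
def buildGraphB (path : List (List Int)) : PySem.Dict Int (PySem.Set Int) :=
  path.foldl (fun g e =>
    match e with
    | [u, v] =>
      let g := g.insert u (PySem.Set.add (g.getD u PySem.Set.empty) v)
      g.insert v (PySem.Set.add (g.getD v PySem.Set.empty) u)
    | _ => g) PySem.Dict.empty

def buildCondsB (order : List (List Int)) : PySem.Dict Int Int :=
  order.foldl (fun c e =>
    match e with
    | [prev, next] => c.insert next prev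
    | _ => c) PySem.Dict.empty

-- one sweep over the candidate nodes ('for v in nodes: …')
def sweepB (g : PySem.Dict Int (PySem.Set Int)) (c : PySem.Dict Int Int)
    (nodes : List Int) (vis : PySem.Set Int) : PySem.Set Int :=
  nodes.foldl (fun vis v =>
    if vis.contains v then vis
    else if v != 0 && !((g.getD v PySem.Set.empty).any (fun u => vis.contains u)) then vis
    else if (c.get? v).any (fun p => !vis.contains p) then vis
    else PySem.Set.add vis v) vis

def solution_alt (n : Int) (path : List (List Int)) (order : List (List Int)) : Bool :=
  let graph := buildGraphB path
  let conditions := buildCondsB order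
  let nodes := 0 :: path.flatten
  let visited := (List.range (nodes.length + 1)).foldl
    (fun vis _ => sweepB graph conditions nodes vis) PySem.Set.empty
  PySem.Set.len visited == n

-- ===== PRECONDITION & SPEC =====
-- Pre_ excludes exactly the inputs on which the Python A raises ValueError:
-- a row of path/order that is not a pair cannot be unpacked by 'for u, v in …'.
def Pre_solution (n : Int) (path : List (List Int)) (order : List (List Int)) : Prop :=
  (∀ e ∈ path, e.length = 2) ∧ (∀ e ∈ order, e.length = 2)
instance (n : Int) (path : List (List Int)) (order : List (List Int)) : Decidable (Pre_solution n path order) := by unfold Pre_solution; infer_instance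

def pvWitness_solution : Int × List (List Int) × List (List Int) := (2, [[0, 1]], [])

def Spec_solution (n : Int) (path : List (List Int)) (order : List (List Int)) (out : Bool) : Prop := out = solution_alt n path order
instance (n : Int) (path : List (List Int)) (order : List (List Int)) (out : Bool) : Decidable (Spec_solution n path order out) := by unfold Spec_solution; infer_instance

-- ===== CLAIM (what is proved, stated in full; the proofs are below) =====
def Claim_equal_solution : Prop := ∀ (n : Int) (path : List (List Int)) (order : List (List Int)), Dom_solution n path order → Pre_solution n path order → Spec_solution n path order (solution n path order)

-- ===== LEMMAS AND PROOFS =====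

-- u–v is an edge recorded in the adjacency dict g
def gmem (g : PySem.Dict Int (PySem.Set Int)) (u v : Int) : Prop :=
  v ∈ g.getD u PySem.Set.empty

-- the order-condition of v (if any) is already visited
def condOk (c : PySem.Dict Int Int) (vis : List Int) (v : Int) : Prop :=
  ∀ p, c.get? v = some p → p ∈ vis

-- v is derivable in one step from the visited set
def reachN (g : PySem.Dict Int (PySem.Set Int)) (vis : List Int) (v : Int) : Prop :=
  v = 0 ∨ ∃ u ∈ vis, gmem g u v

-- vis absorbs every derivable node: one closure step adds nothing
def closedS (g : PySem.Dict Int (PySem.Set Int)) (c : PySem.Dict Int Int) (vis : List Int) : Prop :=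
  ∀ v, reachN g vis v → condOk c vis v → v ∈ vis

-- vis was produced by justified additions only
inductive BuiltS (g : PySem.Dict Int (PySem.Set Int)) (c : PySem.Dict Int Int) : List Int → Prop
  | nil : BuiltS g c []
  | add : ∀ vis v, BuiltS g c vis → reachN g vis v → condOk c vis v →
      BuiltS g c (PySem.Set.add vis v)

theorem built_nodup (g : PySem.Dict Int (PySem.Set Int)) (c : PySem.Dict Int Int)
    (S : List Int) (h : BuiltS g c S) : S.Nodup := by
  induction h with
  | nil => exact List.nodup_nil
  | add vis v _ _ _ ih => exact PySem.Set.nodup_add _ _ ih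

theorem reachN_mono (g : PySem.Dict Int (PySem.Set Int)) (vis vis' : List Int) (v : Int)
    (hs : ∀ x ∈ vis, x ∈ vis') (h : reachN g vis v) : reachN g vis' v := by
  rcases h with h | ⟨u, hu, hg⟩
  · exact Or.inl h
  · exact Or.inr ⟨u, hs u hu, hg⟩

theorem condOk_mono (c : PySem.Dict Int Int) (vis vis' : List Int) (v : Int)
    (hs : ∀ x ∈ vis, x ∈ vis') (h : condOk c vis v) : condOk c vis' v :=
  fun p hp => hs p (h p hp)

theorem built_subset_closed (g : PySem.Dict Int (PySem.Set Int)) (c : PySem.Dict Int Int)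
    (S T : List Int) (hb : BuiltS g c S) (hc : closedS g c T) : ∀ x ∈ S, x ∈ T := by
  induction hb with
  | nil => intro x hx; cases hx
  | add vis v _ hr ho ih =>
    intro x hx
    rcases (PySem.Set.mem_add _ _ _).1 hx with hx | rfl
    · exact ih x hx
    · exact hc x (reachN_mono g vis T x ih hr) (condOk_mono c vis T x ih ho)

-- how many candidate nodes are not yet visited
def unvisC (cands vis : List Int) : Nat :=
  ((PySem.List.dedup cands).filter (fun x => decide (x ∉ vis))).length

theorem unvisC_mono (cands vis vis' : List Int) (hs : ∀ x ∈ vis, x ∈ vis') :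
    unvisC cands vis' ≤ unvisC cands vis := by
  unfold unvisC
  exact (List.monotone_filter_right _ (fun a ha => by
    simp only [decide_eq_true_eq] at *; exact fun h => ha (hs a h))).length_le

theorem unvisC_strict (cands vis vis' : List Int) (x : Int)
    (hx : x ∈ cands) (hxv : x ∉ vis) (hxv' : x ∈ vis') (hs : ∀ y ∈ vis, y ∈ vis') :
    unvisC cands vis' < unvisC cands vis := by
  unfold unvisC
  have hsub := List.monotone_filter_right (PySem.List.dedup cands)
    (p := fun a => decide (a ∉ vis')) (q := fun a => decide (a ∉ vis))
    (fun a ha => by simp only [decide_eq_true_eq] at *; exact fun h => ha (hs a h))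
  refine lt_of_le_of_ne hsub.length_le (fun heq => ?_)
  have := hsub.eq_of_length heq
  have hxmem : x ∈ (PySem.List.dedup cands).filter (fun a => decide (a ∉ vis)) := by
    simp [List.mem_filter, PySem.List.mem_dedup, hx, hxv]
  rw [← this] at hxmem
  simp [List.mem_filter] at hxmem
  exact hxmem.2 hxv'

-- the candidate list covers 0 and every adjacency-bucket member
def GOK (g : PySem.Dict Int (PySem.Set Int)) (cands : List Int) : Prop :=
  (0 : Int) ∈ cands ∧ ∀ u v, gmem g u v → v ∈ cands

-- v is either visited or parked in the bucket of its unvisited condition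
def handledP (c : PySem.Dict Int Int) (dl : PySem.Dict Int (PySem.Set Int))
    (vis : List Int) (v : Int) : Prop :=
  v ∈ vis ∨ ∃ p, c.get? v = some p ∧ p ∉ vis ∧ v ∈ dl.getD p PySem.Set.empty

-- invariant of A's dfs; ex lists the nodes whose obligations are still pending
structure InvA (g : PySem.Dict Int (PySem.Set Int)) (c : PySem.Dict Int Int)
    (ex : List Int) (dl : PySem.Dict Int (PySem.Set Int)) (vis : List Int) : Prop where
  tag : ∀ p w, w ∈ dl.getD p PySem.Set.empty → c.get? w = some p
  sup : BuiltS g c vis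
  rch : ∀ p w, w ∈ dl.getD p PySem.Set.empty → reachN g vis w
  hnd : ∀ u v, u ∈ vis → gmem g u v → v ∈ ex ∨ handledP c dl vis v
  fls : ∀ p w, p ∈ vis → w ∈ dl.getD p PySem.Set.empty → w ∈ ex ∨ w ∈ vis

def DfsOK (g : PySem.Dict Int (PySem.Set Int)) (c : PySem.Dict Int Int)
    (cands : List Int) (fuel : Nat) : Prop :=
  ∀ u ex dl vis, InvA g c ex dl vis → reachN g vis u → unvisC cands vis < fuel →
    (∀ x ∈ vis, x ∈ (dfsA g c fuel u (dl, vis)).2) ∧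
    (∀ w, handledP c dl vis w →
      handledP c (dfsA g c fuel u (dl, vis)).1 (dfsA g c fuel u (dl, vis)).2 w) ∧
    InvA g c ex (dfsA g c fuel u (dl, vis)).1 (dfsA g c fuel u (dl, vis)).2 ∧
    handledP c (dfsA g c fuel u (dl, vis)).1 (dfsA g c fuel u (dl, vis)).2 u

def FoldOK (g : PySem.Dict Int (PySem.Set Int)) (c : PySem.Dict Int Int)
    (cands : List Int) (fuel : Nat) : Prop :=
  ∀ todo ex dl vis, InvA g c (todo ++ ex) dl vis → (∀ v ∈ todo, reachN g vis v) →
    unvisC cands vis < fuel →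
    (∀ x ∈ vis, x ∈ (todo.foldl (fun st v => dfsA g c fuel v st) (dl, vis)).2) ∧
    (∀ w, handledP c dl vis w →
      handledP c (todo.foldl (fun st v => dfsA g c fuel v st) (dl, vis)).1
        (todo.foldl (fun st v => dfsA g c fuel v st) (dl, vis)).2 w) ∧
    InvA g c ex (todo.foldl (fun st v => dfsA g c fuel v st) (dl, vis)).1
      (todo.foldl (fun st v => dfsA g c fuel v st) (dl, vis)).2 ∧
    (∀ v ∈ todo, handledP c (todo.foldl (fun st v => dfsA g c fuel v st) (dl, vis)).1
      (todo.foldl (fun st v => dfsA g c fuel v st) (dl, vis)).2 v)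


theorem dfsA_mem (g : PySem.Dict Int (PySem.Set Int)) (c : PySem.Dict Int Int)
    (fuel : Nat) (u : Int) (dl : PySem.Dict Int (PySem.Set Int)) (vis : PySem.Set Int)
    (h : u ∈ vis) : dfsA g c (fuel+1) u (dl, vis) = (dl, vis) := by
  simp [dfsA, h]

theorem dfsA_delay (g : PySem.Dict Int (PySem.Set Int)) (c : PySem.Dict Int Int)
    (fuel : Nat) (u : Int) (dl : PySem.Dict Int (PySem.Set Int)) (vis : PySem.Set Int)
    (p : Int) (hu : u ∉ vis)
    (h : (c.get? u).filter (fun p => !decide (p ∈ vis)) = some p) :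
    dfsA g c (fuel+1) u (dl, vis) = (dl.insert p (PySem.Set.add (dl.getD p PySem.Set.empty) u), vis) := by
  simp [dfsA, hu, h]

theorem dfsA_visit (g : PySem.Dict Int (PySem.Set Int)) (c : PySem.Dict Int Int)
    (fuel : Nat) (u : Int) (dl : PySem.Dict Int (PySem.Set Int)) (vis : PySem.Set Int)
    (hu : u ∉ vis)
    (h : (c.get? u).filter (fun p => !decide (p ∈ vis)) = none) :
    dfsA g c (fuel+1) u (dl, vis) =
      (g.getD u PySem.Set.empty).foldl (fun st v => dfsA g c fuel v st)
        ((((dl.getD u PySem.Set.empty).foldl (fun st v => dfsA g c fuel v st)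
            (dl, PySem.Set.add vis u)).1.erase u),
         ((dl.getD u PySem.Set.empty).foldl (fun st v => dfsA g c fuel v st)
            (dl, PySem.Set.add vis u)).2) := by
  simp [dfsA, hu, h]

theorem dict_get?_erase {ν : Type} (d : PySem.Dict Int ν) (k k' : Int) :
    (d.erase k).get? k' = if k' = k then none else d.get? k' := by
  obtain ⟨items⟩ := d
  induction items with
  | nil => simp [PySem.Dict.erase, PySem.Dict.get?]
  | cons p t ih =>
    simp only [PySem.Dict.erase, PySem.Dict.get?, List.filter_cons] at *
    by_cases h1 : p.1 = k <;> by_cases h2 : p.1 = k' <;> simp_all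

theorem dict_getD_erase {ν : Type} (d : PySem.Dict Int ν) (k k' : Int) (d0 : ν) :
    (d.erase k).getD k' d0 = if k' = k then d0 else d.getD k' d0 := by
  rw [PySem.Dict.getD_eq_get?_getD, dict_get?_erase, PySem.Dict.getD_eq_get?_getD]
  split <;> rfl

theorem invA_shrink (g : PySem.Dict Int (PySem.Set Int)) (c : PySem.Dict Int Int)
    (w : Int) (ex : List Int) (dl : PySem.Dict Int (PySem.Set Int)) (vis : List Int)
    (h : InvA g c (w :: ex) dl vis) (hw : handledP c dl vis w) : InvA g c ex dl vis := by
  refine ⟨h.tag, h.sup, h.rch, ?_, ?_⟩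
  · intro u v hu hgv
    rcases h.hnd u v hu hgv with hex | hh
    · rcases List.mem_cons.1 hex with rfl | hex
      · exact Or.inr hw
      · exact Or.inl hex
    · exact Or.inr hh
  · intro p w' hp hw'
    rcases h.fls p w' hp hw' with hex | hv
    · rcases List.mem_cons.1 hex with rfl | hex
      · rcases hw with hv | ⟨p', hc', hp', _⟩
        · exact Or.inr hv
        · have := h.tag p w' hw'
          rw [this] at hc'
          cases hc'
          exact absurd hp hp'
      · exact Or.inl hex
    · exact Or.inr hv

theorem handledP_erase (c : PySem.Dict Int Int) (dl : PySem.Dict Int (PySem.Set Int))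
    (vis : List Int) (u w : Int) (hu : u ∈ vis) (h : handledP c dl vis w) :
    handledP c (dl.erase u) vis w := by
  rcases h with hv | ⟨p, hc, hp, hb⟩
  · exact Or.inl hv
  · refine Or.inr ⟨p, hc, hp, ?_⟩
    rw [dict_getD_erase]
    rw [if_neg (fun hpu => hp (by rw [hpu]; exact hu))]
    exact hb

theorem invA_erase (g : PySem.Dict Int (PySem.Set Int)) (c : PySem.Dict Int Int)
    (u : Int) (ex : List Int) (dl : PySem.Dict Int (PySem.Set Int)) (vis : List Int)
    (hu : u ∈ vis) (h : InvA g c ex dl vis) : InvA g c ex (dl.erase u) vis := by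
  have hbkt : ∀ p w, w ∈ (dl.erase u).getD p PySem.Set.empty → w ∈ dl.getD p PySem.Set.empty := by
    intro p w hw
    rw [dict_getD_erase] at hw
    split at hw
    · cases hw
    · exact hw
  refine ⟨fun p w hw => h.tag p w (hbkt p w hw), h.sup, fun p w hw => h.rch p w (hbkt p w hw), ?_, ?_⟩
  · intro u' v hu' hgv
    rcases h.hnd u' v hu' hgv with hex | hh
    · exact Or.inl hex
    · exact Or.inr (handledP_erase c dl vis u v hu hh)
  · intro p w hp hw
    exact h.fls p w hp (hbkt p w hw)


theorem foldOK_of (g : PySem.Dict Int (PySem.Set Int)) (c : PySem.Dict Int Int)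
    (cands : List Int) (fuel : Nat) (hd : DfsOK g c cands fuel) : FoldOK g c cands fuel := by
  intro todo
  induction todo with
  | nil =>
    intro ex dl vis hinv hr hfu
    exact ⟨fun x hx => hx, fun w h => h, hinv, fun v hv => absurd hv List.not_mem_nil⟩
  | cons w rest ih =>
    intro ex dl vis hinv hr hfu
    simp only [List.foldl_cons]
    obtain ⟨hsub1, hpre1, hinv1, hh1⟩ :=
      hd w ((w :: rest) ++ ex) dl vis hinv (hr w List.mem_cons_self) hfu
    have hinv1' : InvA g c (rest ++ ex) (dfsA g c fuel w (dl, vis)).1 (dfsA g c fuel w (dl, vis)).2 :=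
      invA_shrink g c w (rest ++ ex) _ _ hinv1 hh1
    have hfu1 : unvisC cands (dfsA g c fuel w (dl, vis)).2 < fuel :=
      lt_of_le_of_lt (unvisC_mono cands vis _ hsub1) hfu
    have hr1 : ∀ v ∈ rest, reachN g (dfsA g c fuel w (dl, vis)).2 v :=
      fun v hv => reachN_mono g vis _ v hsub1 (hr v (List.mem_cons_of_mem w hv))
    obtain ⟨hsub2, hpre2, hinv2, hh2⟩ := ih ex (dfsA g c fuel w (dl, vis)).1 (dfsA g c fuel w (dl, vis)).2 hinv1' hr1 hfu1
    rw [Prod.mk.eta] at hsub2 hpre2 hinv2 hh2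
    refine ⟨fun x hx => hsub2 x (hsub1 x hx), fun x hx => hpre2 x (hpre1 x hx), hinv2, ?_⟩
    intro v hv
    rcases List.mem_cons.1 hv with rfl | hv
    · exact hpre2 v hh1
    · exact hh2 v hv

theorem dfsOK_all (g : PySem.Dict Int (PySem.Set Int)) (c : PySem.Dict Int Int)
    (cands : List Int) (hg : GOK g cands) : ∀ fuel, DfsOK g c cands fuel := by
  intro fuel
  induction fuel with
  | zero => intro u ex dl vis hinv hr hfu; exact absurd hfu (Nat.not_lt_zero _)
  | succ fuel ih =>
    have hfold := foldOK_of g c cands fuel ih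
    intro u ex dl vis hinv hr hfu
    by_cases hu : u ∈ vis
    · rw [dfsA_mem g c fuel u dl vis hu]
      exact ⟨fun x hx => hx, fun w h => h, hinv, Or.inl hu⟩
    · cases hc : (c.get? u).filter (fun p => !decide (p ∈ vis)) with
      | some p =>
        rw [dfsA_delay g c fuel u dl vis p hu hc]
        obtain ⟨hget, hpb⟩ := Option.filter_eq_some_iff.1 hc
        have hpvis : p ∉ vis := by simpa using hpb
        have hbkt : ∀ q, (dl.insert p (PySem.Set.add (dl.getD p PySem.Set.empty) u)).getD q PySem.Set.empty
            = if q = p then PySem.Set.add (dl.getD p PySem.Set.empty) u else dl.getD q PySem.Set.empty := by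
          intro q; rw [PySem.Dict.getD_insert]
        have hpres : ∀ w, handledP c dl vis w →
            handledP c (dl.insert p (PySem.Set.add (dl.getD p PySem.Set.empty) u)) vis w := by
          intro w hw
          rcases hw with hv | ⟨q, hcq, hq, hb⟩
          · exact Or.inl hv
          · refine Or.inr ⟨q, hcq, hq, ?_⟩
            rw [hbkt]
            split
            · next hqp => subst hqp; exact (PySem.Set.mem_add _ _ _).2 (Or.inl hb)
            · exact hb
        refine ⟨fun x hx => hx, hpres, ?_, ?_⟩
        · refine ⟨?_, hinv.sup, ?_, ?_, ?_⟩
          · intro q w hw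
            rw [hbkt] at hw
            split at hw
            · next hqp =>
              subst hqp
              rcases (PySem.Set.mem_add _ _ _).1 hw with hw | rfl
              · exact hinv.tag q w hw
              · exact hget
            · exact hinv.tag q w hw
          · intro q w hw
            rw [hbkt] at hw
            split at hw
            · next hqp =>
              subst hqp
              rcases (PySem.Set.mem_add _ _ _).1 hw with hw | rfl
              · exact hinv.rch q w hw
              · exact hr
            · exact hinv.rch q w hw
          · intro u' v hu' hgv
            rcases hinv.hnd u' v hu' hgv with hex | hh
            · exact Or.inl hex
            · exact Or.inr (hpres v hh)
          · intro q w hq hw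
            rw [hbkt] at hw
            split at hw
            · next hqp => subst hqp; exact absurd hq hpvis
            · exact hinv.fls q w hq hw
        · refine Or.inr ⟨p, hget, hpvis, ?_⟩
          rw [hbkt, if_pos rfl]
          exact (PySem.Set.mem_add _ _ _).2 (Or.inr rfl)
      | none =>
        have hcondOk : condOk c vis u := by
          intro q hq
          have := Option.filter_eq_none_iff.1 hc q hq
          simpa using this
        rw [dfsA_visit g c fuel u dl vis hu hc]
        have hsubv1 : ∀ x ∈ vis, x ∈ PySem.Set.add vis u :=
          fun x hx => (PySem.Set.mem_add _ _ _).2 (Or.inl hx)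
        have huv1 : u ∈ PySem.Set.add vis u := (PySem.Set.mem_add _ _ _).2 (Or.inr rfl)
        have hucand : u ∈ cands := by
          rcases hr with rfl | ⟨u', _, hg'⟩
          · exact hg.1
          · exact hg.2 u' u hg'
        have hfu1 : unvisC cands (PySem.Set.add vis u) < fuel := by
          have h1 := unvisC_strict cands vis (PySem.Set.add vis u) u hucand hu huv1 hsubv1
          omega
        have hinv1 : InvA g c (dl.getD u PySem.Set.empty ++ (g.getD u PySem.Set.empty ++ ex))
            dl (PySem.Set.add vis u) := by
          refine ⟨hinv.tag, BuiltS.add vis u hinv.sup hr hcondOk,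
            fun p w hw => reachN_mono g vis _ w hsubv1 (hinv.rch p w hw), ?_, ?_⟩
          · intro u' v hu' hgv
            rcases (PySem.Set.mem_add _ _ _).1 hu' with hu' | rfl
            · rcases hinv.hnd u' v hu' hgv with hex | hh
              · exact Or.inl (List.mem_append_right _ (List.mem_append_right _ hex))
              · rcases hh with hv | ⟨p, hcp, hp, hb⟩
                · exact Or.inr (Or.inl (hsubv1 v hv))
                · by_cases hpu : p = u
                  · subst hpu
                    exact Or.inl (List.mem_append_left _ hb)
                  · refine Or.inr (Or.inr ⟨p, hcp, ?_, hb⟩)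
                    intro hmem
                    rcases (PySem.Set.mem_add _ _ _).1 hmem with hmem | rfl
                    · exact hp hmem
                    · exact hpu rfl
            · exact Or.inl (List.mem_append_right _ (List.mem_append_left _ hgv))
          · intro p w hp hw
            rcases (PySem.Set.mem_add _ _ _).1 hp with hp | rfl
            · rcases hinv.fls p w hp hw with hex | hv
              · exact Or.inl (List.mem_append_right _ (List.mem_append_right _ hex))
              · exact Or.inr (hsubv1 w hv)
            · exact Or.inl (List.mem_append_left _ hw)
        have hrd : ∀ v ∈ dl.getD u PySem.Set.empty, reachN g (PySem.Set.add vis u) v :=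
          fun v hv => reachN_mono g vis _ v hsubv1 (hinv.rch u v hv)
        obtain ⟨hsubA, hpreA, hinvA, hhA⟩ :=
          hfold (dl.getD u PySem.Set.empty) (g.getD u PySem.Set.empty ++ ex) dl
            (PySem.Set.add vis u) hinv1 hrd hfu1
        have hu_in_st1 : u ∈ ((dl.getD u PySem.Set.empty).foldl (fun st v => dfsA g c fuel v st)
            (dl, PySem.Set.add vis u)).2 := hsubA u huv1
        have hinv2 := invA_erase g c u (g.getD u PySem.Set.empty ++ ex) _ _ hu_in_st1 hinvA
        have hrg : ∀ v ∈ g.getD u PySem.Set.empty,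
            reachN g ((dl.getD u PySem.Set.empty).foldl (fun st v => dfsA g c fuel v st)
              (dl, PySem.Set.add vis u)).2 v :=
          fun v hv => Or.inr ⟨u, hu_in_st1, hv⟩
        have hfu2 : unvisC cands ((dl.getD u PySem.Set.empty).foldl (fun st v => dfsA g c fuel v st)
            (dl, PySem.Set.add vis u)).2 < fuel :=
          lt_of_le_of_lt (unvisC_mono cands _ _ hsubA) hfu1
        obtain ⟨hsubB, hpreB, hinvB, hhB⟩ :=
          hfold (g.getD u PySem.Set.empty) ex
            (((dl.getD u PySem.Set.empty).foldl (fun st v => dfsA g c fuel v st)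
              (dl, PySem.Set.add vis u)).1.erase u)
            ((dl.getD u PySem.Set.empty).foldl (fun st v => dfsA g c fuel v st)
              (dl, PySem.Set.add vis u)).2 hinv2 hrg hfu2
        refine ⟨?_, ?_, hinvB, ?_⟩
        · exact fun x hx => hsubB x (hsubA x (hsubv1 x hx))
        · intro w hw
          rcases hw with hv | ⟨p, hcp, hp, hb⟩
          · exact hpreB w (handledP_erase c _ _ u w hu_in_st1 (hpreA w (Or.inl (hsubv1 w hv))))
          · by_cases hpu : p = u
            · subst hpu
              exact hpreB w (handledP_erase c _ _ p w hu_in_st1 (hhA w hb))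
            · refine hpreB w (handledP_erase c _ _ u w hu_in_st1 (hpreA w ?_))
              refine Or.inr ⟨p, hcp, ?_, hb⟩
              intro hmem
              rcases (PySem.Set.mem_add _ _ _).1 hmem with hmem | rfl
              · exact hp hmem
              · exact hpu rfl
        · exact Or.inl (hsubB u hu_in_st1)

theorem A_final (g : PySem.Dict Int (PySem.Set Int)) (c : PySem.Dict Int Int)
    (cands : List Int) (hg : GOK g cands) (fuel : Nat)
    (hfuel : unvisC cands [] < fuel) :
    BuiltS g c (dfsA g c fuel 0 (PySem.Dict.empty, PySem.Set.empty)).2 ∧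
    closedS g c (dfsA g c fuel 0 (PySem.Dict.empty, PySem.Set.empty)).2 := by
  have hinv0 : InvA g c [] PySem.Dict.empty PySem.Set.empty := by
    refine ⟨?_, BuiltS.nil, ?_, ?_, ?_⟩
    · intro p w hw
      rw [PySem.Dict.getD_empty] at hw
      cases hw
    · intro p w hw
      rw [PySem.Dict.getD_empty] at hw
      cases hw
    · intro u v hu _
      cases hu
    · intro p w hp _
      cases hp
  obtain ⟨_, _, hinvF, hh0⟩ :=
    dfsOK_all g c cands hg fuel 0 [] PySem.Dict.empty PySem.Set.empty hinv0 (Or.inl rfl) hfuel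
  refine ⟨hinvF.sup, ?_⟩
  intro v hrv hcv
  have hhandled : handledP c (dfsA g c fuel 0 (PySem.Dict.empty, PySem.Set.empty)).1
      (dfsA g c fuel 0 (PySem.Dict.empty, PySem.Set.empty)).2 v := by
    rcases hrv with rfl | ⟨u', hu', hgv⟩
    · exact hh0
    · rcases hinvF.hnd u' v hu' hgv with hex | hh
      · cases hex
      · exact hh
  rcases hhandled with hv | ⟨p, hcp, hp, _⟩
  · exact hv
  · exact absurd (hcv p hcp) hp

-- ===== B-side lemmas =====

-- the body of B's sweep loop, named for the proofs
def stepB (g : PySem.Dict Int (PySem.Set Int)) (c : PySem.Dict Int Int)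
    (vis : PySem.Set Int) (v : Int) : PySem.Set Int :=
  if vis.contains v then vis
  else if v != 0 && !((g.getD v PySem.Set.empty).any (fun u => vis.contains u)) then vis
  else if (c.get? v).any (fun p => !vis.contains p) then vis
  else PySem.Set.add vis v

theorem sweepB_eq_foldl (g : PySem.Dict Int (PySem.Set Int)) (c : PySem.Dict Int Int)
    (nodes : List Int) (vis : PySem.Set Int) :
    sweepB g c nodes vis = nodes.foldl (stepB g c) vis := rfl

-- v qualifies for addition during a sweep over a state vis
def eligB (g : PySem.Dict Int (PySem.Set Int)) (c : PySem.Dict Int Int)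
    (vis : List Int) (v : Int) : Prop :=
  (v = 0 ∨ ∃ u ∈ g.getD v PySem.Set.empty, u ∈ vis) ∧ condOk c vis v

theorem stepB_spec (g : PySem.Dict Int (PySem.Set Int)) (c : PySem.Dict Int Int)
    (vis : PySem.Set Int) (v : Int) :
    (stepB g c vis v = vis ∧ (v ∈ vis ∨ ¬ eligB g c vis v)) ∨
    (v ∉ vis ∧ eligB g c vis v ∧ stepB g c vis v = PySem.Set.add vis v) := by
  unfold stepB
  split_ifs with hv h2 h3
  · exact Or.inl ⟨rfl, Or.inl ((PySem.Set.contains_iff _ _).1 hv)⟩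
  · left
    refine ⟨rfl, Or.inr ?_⟩
    rintro ⟨h1, _⟩
    simp only [bne_iff_ne, Bool.and_eq_true, Bool.not_eq_true', List.any_eq_false] at h2
    rcases h1 with rfl | ⟨u, hu, huv⟩
    · exact h2.1 rfl
    · have := h2.2 u hu
      rw [PySem.Set.contains_eq_listContains] at this
      simp [huv] at this
  · left
    refine ⟨rfl, Or.inr ?_⟩
    rintro ⟨_, hco⟩
    cases hcg : c.get? v with
    | none => simp [Option.any, hcg] at h3
    | some p =>
      have := hco p hcg
      rw [hcg] at h3
      simp only [Option.any, Bool.not_eq_true', PySem.Set.contains_eq_listContains] at h3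
      simp [this] at h3
  · right
    have hvm : v ∉ vis := fun h => hv ((PySem.Set.contains_iff _ _).2 h)
    refine ⟨hvm, ⟨?_, ?_⟩, rfl⟩
    · by_cases hz : v = 0
      · exact Or.inl hz
      · right
        simp only [bne_iff_ne, Bool.and_eq_true, Bool.not_eq_true'] at h2
        have h2' : (List.any (g.getD v PySem.Set.empty) fun u => vis.contains u) = true := by
          by_contra hfalse
          exact h2 ⟨hz, by revert hfalse; cases (List.any (g.getD v PySem.Set.empty) fun u => vis.contains u) <;> simp⟩
        rw [List.any_eq_true] at h2'
        obtain ⟨u, hu, huv⟩ := h2'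
        exact ⟨u, hu, (PySem.Set.contains_iff _ _).1 huv⟩
    · intro p hp
      rw [hp] at h3
      simp only [Option.any, Bool.not_eq_true', PySem.Set.contains_eq_listContains] at h3
      simpa using h3

theorem stepB_prefix (g : PySem.Dict Int (PySem.Set Int)) (c : PySem.Dict Int Int)
    (vis : PySem.Set Int) (v : Int) : vis <+: stepB g c vis v := by
  rcases stepB_spec g c vis v with ⟨heq, _⟩ | ⟨hvm, _, heq⟩
  · rw [heq]
  · rw [heq, PySem.Set.add_of_not_mem hvm]
    exact List.prefix_append vis [v]

theorem foldB_prefix (g : PySem.Dict Int (PySem.Set Int)) (c : PySem.Dict Int Int) :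
    ∀ (l : List Int) (vis : PySem.Set Int), vis <+: l.foldl (stepB g c) vis := by
  intro l
  induction l with
  | nil => intro vis; exact List.prefix_rfl
  | cons v rest ih =>
    intro vis
    exact List.IsPrefix.trans (stepB_prefix g c vis v) (ih (stepB g c vis v))

theorem foldB_built (g : PySem.Dict Int (PySem.Set Int)) (c : PySem.Dict Int Int)
    (gsym : ∀ a b, gmem g a b → gmem g b a) :
    ∀ (l : List Int) (vis : PySem.Set Int), BuiltS g c vis → BuiltS g c (l.foldl (stepB g c) vis) := by
  intro l
  induction l with
  | nil => intro vis hb; exact hb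
  | cons v rest ih =>
    intro vis hb
    refine ih (stepB g c vis v) ?_
    rcases stepB_spec g c vis v with ⟨heq, _⟩ | ⟨hvm, ⟨he1, he2⟩, heq⟩
    · rw [heq]; exact hb
    · rw [heq]
      refine BuiltS.add vis v hb ?_ he2
      rcases he1 with rfl | ⟨u, hu, huv⟩
      · exact Or.inl rfl
      · exact Or.inr ⟨u, huv, gsym v u hu⟩

theorem foldB_new (g : PySem.Dict Int (PySem.Set Int)) (c : PySem.Dict Int Int) :
    ∀ (l : List Int) (vis : PySem.Set Int) (x : Int),
      x ∈ l.foldl (stepB g c) vis → x ∈ vis ∨ x ∈ l := by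
  intro l
  induction l with
  | nil => intro vis x hx; exact Or.inl hx
  | cons v rest ih =>
    intro vis x hx
    rcases ih (stepB g c vis v) x hx with hx1 | hx1
    · rcases stepB_spec g c vis v with ⟨heq, _⟩ | ⟨hvm, _, heq⟩
      · rw [heq] at hx1; exact Or.inl hx1
      · rw [heq] at hx1
        rcases (PySem.Set.mem_add _ _ _).1 hx1 with hx1 | rfl
        · exact Or.inl hx1
        · exact Or.inr List.mem_cons_self
    · exact Or.inr (List.mem_cons_of_mem v hx1)

theorem foldB_nodup (g : PySem.Dict Int (PySem.Set Int)) (c : PySem.Dict Int Int) :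
    ∀ (l : List Int) (vis : PySem.Set Int), vis.Nodup → (l.foldl (stepB g c) vis).Nodup := by
  intro l
  induction l with
  | nil => intro vis h; exact h
  | cons v rest ih =>
    intro vis h
    refine ih (stepB g c vis v) ?_
    rcases stepB_spec g c vis v with ⟨heq, _⟩ | ⟨_, _, heq⟩
    · rw [heq]; exact h
    · rw [heq]; exact PySem.Set.nodup_add _ _ h

theorem foldB_stable_mem (g : PySem.Dict Int (PySem.Set Int)) (c : PySem.Dict Int Int) :
    ∀ (l : List Int) (vis : PySem.Set Int), l.foldl (stepB g c) vis = vis →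
      ∀ v ∈ l, eligB g c vis v → v ∈ vis := by
  intro l
  induction l with
  | nil => intro vis _ v hv; cases hv
  | cons w rest ih =>
    intro vis hst v hv helig
    rw [List.foldl_cons] at hst
    have hpre1 := stepB_prefix g c vis w
    have hpre2 := foldB_prefix g c rest (stepB g c vis w)
    rw [hst] at hpre2
    have hlen : (stepB g c vis w).length = vis.length :=
      le_antisymm hpre2.length_le hpre1.length_le
    have heq : stepB g c vis w = vis := by
      have := hpre2.eq_of_length hlen
      exact this
    rcases List.mem_cons.1 hv with rfl | hv
    · rcases stepB_spec g c vis v with ⟨_, hm⟩ | ⟨hvm, _, hadd⟩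
      · rcases hm with hm | hm
        · exact hm
        · exact absurd helig hm
      · rw [hadd, PySem.Set.add_of_not_mem hvm] at heq
        have : vis.length + 1 = vis.length := by
          simpa using congrArg List.length heq
        omega
    · rw [heq] at hst
      exact ih vis hst v hv helig

theorem sweep_stable_closed (g : PySem.Dict Int (PySem.Set Int)) (c : PySem.Dict Int Int)
    (nodes : List Int) (vis : PySem.Set Int)
    (gsym : ∀ a b, gmem g a b → gmem g b a) (hg : GOK g nodes)
    (hstable : sweepB g c nodes vis = vis) : closedS g c vis := by
  intro v hr hcv
  have hvn : v ∈ nodes := by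
    rcases hr with rfl | ⟨u, _, hgv⟩
    · exact hg.1
    · exact hg.2 u v hgv
  refine foldB_stable_mem g c nodes vis (by rw [← sweepB_eq_foldl]; exact hstable) v hvn ⟨?_, hcv⟩
  rcases hr with rfl | ⟨u, hu, hgv⟩
  · exact Or.inl rfl
  · exact Or.inr ⟨u, gsym u v hgv, hu⟩

theorem iter_stable (g : PySem.Dict Int (PySem.Set Int)) (c : PySem.Dict Int Int)
    (nodes : List Int) : ∀ (k : Nat) (vis : PySem.Set Int), vis.Nodup →
    unvisC nodes vis < k →
    sweepB g c nodes ((sweepB g c nodes)^[k] vis) = (sweepB g c nodes)^[k] vis := by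
  intro k
  induction k with
  | zero => intro vis _ h; exact absurd h (Nat.not_lt_zero _)
  | succ m ih =>
    intro vis hnd hlt
    by_cases hfix : sweepB g c nodes vis = vis
    · rw [Function.iterate_fixed hfix]
      exact hfix
    · rw [Function.iterate_succ_apply]
      refine ih (sweepB g c nodes vis) ?_ ?_
      · rw [sweepB_eq_foldl]
        exact foldB_nodup g c nodes vis hnd
      · have hpre := foldB_prefix g c nodes vis
        rw [← sweepB_eq_foldl] at hpre
        obtain ⟨t, ht⟩ := hpre
        have htne : t ≠ [] := by
          intro h
          rw [h, List.append_nil] at ht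
          exact hfix ht.symm -- careful direction
        obtain ⟨x, hx⟩ := List.exists_mem_of_ne_nil t htne
        have hxsweep : x ∈ sweepB g c nodes vis := by
          rw [← ht]; exact List.mem_append_right vis hx
        have hxnodes : x ∈ nodes := by
          rcases foldB_new g c nodes vis x (by rw [← sweepB_eq_foldl]; exact hxsweep) with h | h
          · exfalso
            have hndsw : (sweepB g c nodes vis).Nodup := by
              rw [sweepB_eq_foldl]; exact foldB_nodup g c nodes vis hnd
            rw [← ht] at hndsw
            exact (List.disjoint_of_nodup_append hndsw) h hx
          · exact h
        have hxvis : x ∉ vis := by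
          have hndsw : (sweepB g c nodes vis).Nodup := by
            rw [sweepB_eq_foldl]; exact foldB_nodup g c nodes vis hnd
          rw [← ht] at hndsw
          intro hmem
          exact (List.disjoint_of_nodup_append hndsw) hmem hx
        have hsubs : ∀ y ∈ vis, y ∈ sweepB g c nodes vis := by
          intro y hy
          rw [← ht]
          exact List.mem_append_left t hy
        have := unvisC_strict nodes vis (sweepB g c nodes vis) x hxnodes hxvis hxsweep hsubs
        omega

-- ===== graph structure lemmas =====

-- the fold step of the graph builders, named for the proofs
def stepG (g : PySem.Dict Int (PySem.Set Int)) (e : List Int) : PySem.Dict Int (PySem.Set Int) :=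
  match e with
  | [u, v] =>
    let g := g.insert u (PySem.Set.add (g.getD u PySem.Set.empty) v)
    g.insert v (PySem.Set.add (g.getD v PySem.Set.empty) u)
  | _ => g

theorem buildGraphA_eq (path : List (List Int)) :
    buildGraphA path = path.foldl stepG PySem.Dict.empty := rfl

theorem gmem_stepG_pair (g : PySem.Dict Int (PySem.Set Int)) (a b u v : Int) :
    gmem (stepG g [a, b]) u v ↔ gmem g u v ∨ (u = a ∧ v = b) ∨ (u = b ∧ v = a) := by
  simp only [stepG, gmem, PySem.Dict.getD_insert]
  by_cases h1 : u = b <;> by_cases h2 : u = a <;> by_cases h3 : b = a <;> simp_all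

theorem gmem_fold_cand : ∀ (path : List (List Int)) (g0 : PySem.Dict Int (PySem.Set Int)) (u v : Int),
    gmem (path.foldl stepG g0) u v → gmem g0 u v ∨ v ∈ path.flatten := by
  intro path
  induction path with
  | nil => intro g0 u v h; exact Or.inl h
  | cons e rest ih =>
    intro g0 u v h
    rw [List.foldl_cons] at h
    rcases ih (stepG g0 e) u v h with h1 | h1
    · match e with
      | [a, b] =>
        rcases (gmem_stepG_pair g0 a b u v).1 h1 with h2 | ⟨_, rfl⟩ | ⟨_, rfl⟩
        · exact Or.inl h2
        · right; simp
        · right; simp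
      | [] => exact Or.inl h1
      | [a] => exact Or.inl h1
      | a :: b :: x :: r => exact Or.inl h1
    · right
      simp only [List.flatten_cons, List.mem_append]
      exact Or.inr h1

theorem gmem_fold_symm : ∀ (path : List (List Int)) (g0 : PySem.Dict Int (PySem.Set Int)),
    (∀ a b, gmem g0 a b → gmem g0 b a) →
    ∀ u v, gmem (path.foldl stepG g0) u v → gmem (path.foldl stepG g0) v u := by
  intro path
  induction path with
  | nil => intro g0 hs u v h; exact hs u v h
  | cons e rest ih =>
    intro g0 hs u v
    rw [List.foldl_cons]
    refine ih (stepG g0 e) ?_ u v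
    match e with
    | [a, b] =>
      intro x y hxy
      rcases (gmem_stepG_pair g0 a b x y).1 hxy with h2 | ⟨hxa, hyb⟩ | ⟨hxb, hya⟩
      · exact (gmem_stepG_pair g0 a b y x).2 (Or.inl (hs x y h2))
      · exact (gmem_stepG_pair g0 a b y x).2 (Or.inr (Or.inr ⟨hyb, hxa⟩))
      · exact (gmem_stepG_pair g0 a b y x).2 (Or.inr (Or.inl ⟨hya, hxb⟩))
    | [] => exact hs
    | [a] => exact hs
    | a :: b :: x :: r => exact hs

theorem gmem_build_cand (path : List (List Int)) (u v : Int)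
    (h : gmem (buildGraphA path) u v) : v ∈ path.flatten := by
  rw [buildGraphA_eq] at h
  rcases gmem_fold_cand path PySem.Dict.empty u v h with h1 | h1
  · unfold gmem at h1
    rw [PySem.Dict.getD_empty] at h1
    cases h1
  · exact h1

theorem gmem_build_symm (path : List (List Int)) (u v : Int) :
    gmem (buildGraphA path) u v → gmem (buildGraphA path) v u := by
  rw [buildGraphA_eq]
  refine gmem_fold_symm path PySem.Dict.empty ?_ u v
  intro a b h
  unfold gmem at h
  rw [PySem.Dict.getD_empty] at h
  cases h

-- ===== assembly =====

theorem foldl_range_iterate {α : Type} (f : α → α) (k : Nat) (a : α) :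
    (List.range k).foldl (fun x _ => f x) a = f^[k] a := by
  induction k generalizing a with
  | zero => rfl
  | succ m ih => rw [List.range_succ, List.foldl_append, ih, Function.iterate_succ_apply']; rfl

theorem visited_perm (path : List (List Int)) (order : List (List Int)) :
    ((dfsA (buildGraphA path) (buildCondsA order) (path.flatten.length + 2) 0
        (PySem.Dict.empty, PySem.Set.empty)).2).Perm
      ((List.range ((0 :: path.flatten).length + 1)).foldl
        (fun vis _ => sweepB (buildGraphA path) (buildCondsA order) (0 :: path.flatten) vis)
        PySem.Set.empty) := by
  have hg : GOK (buildGraphA path) (0 :: path.flatten) :=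
    ⟨List.mem_cons_self, fun u v h => List.mem_cons_of_mem 0 (gmem_build_cand path u v h)⟩
  have hsym := gmem_build_symm path
  have hunv : unvisC (0 :: path.flatten) [] ≤ path.flatten.length + 1 := by
    unfold unvisC
    have h1 := List.length_filter_le (fun x => decide (x ∉ ([] : List Int)))
      (PySem.List.dedup (0 :: path.flatten))
    have h2 : (PySem.List.dedup (0 :: path.flatten)).length ≤ (0 :: path.flatten).length := by
      rw [PySem.List.dedup_eq_ofList]
      exact PySem.Set.length_ofList_le _
    simp only [List.length_cons] at h2
    omega
  obtain ⟨hbuiltA, hclosedA⟩ := A_final (buildGraphA path) (buildCondsA order)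
    (0 :: path.flatten) hg (path.flatten.length + 2) (by omega)
  rw [foldl_range_iterate]
  have hbuiltB : ∀ k, BuiltS (buildGraphA path) (buildCondsA order)
      ((sweepB (buildGraphA path) (buildCondsA order) (0 :: path.flatten))^[k] PySem.Set.empty) := by
    intro k
    induction k with
    | zero => exact BuiltS.nil
    | succ m ih =>
      rw [Function.iterate_succ_apply', sweepB_eq_foldl]
      exact foldB_built _ _ hsym _ _ ih
  have hnodupB : ∀ k, (((sweepB (buildGraphA path) (buildCondsA order) (0 :: path.flatten))^[k]
      PySem.Set.empty) : List Int).Nodup := by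
    intro k
    induction k with
    | zero => exact List.nodup_nil
    | succ m ih =>
      rw [Function.iterate_succ_apply', sweepB_eq_foldl]
      exact foldB_nodup _ _ _ _ ih
  have hstable := iter_stable (buildGraphA path) (buildCondsA order) (0 :: path.flatten)
    ((0 :: path.flatten).length + 1) PySem.Set.empty List.nodup_nil
    (by show unvisC (0 :: path.flatten) [] < (0 :: path.flatten).length + 1
        simp only [List.length_cons]; omega)
  have hclosedB := sweep_stable_closed (buildGraphA path) (buildCondsA order) (0 :: path.flatten)
    _ hsym hg hstable
  have hnodupA := built_nodup _ _ _ hbuiltA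
  have hAB := built_subset_closed _ _ _ _ hbuiltA hclosedB
  have hBA := built_subset_closed _ _ _ _ (hbuiltB ((0 :: path.flatten).length + 1)) hclosedA
  exact (List.perm_ext_iff_of_nodup hnodupA (hnodupB _)).2
    (fun a => ⟨fun h => hAB a h, fun h => hBA a h⟩)

-- ===== VERDICT (by name: the statement is the Claim_ definition above) =====
theorem solution_spec : Claim_equal_solution := by
  intro n path order _ _
  unfold Spec_solution solution solution_alt
  have hlen := (visited_perm path order).length_eq
  show (PySem.Set.len (dfsA (buildGraphA path) (buildCondsA order) (path.flatten.length + 2) 0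
      (PySem.Dict.empty, PySem.Set.empty)).2 == n) =
    (PySem.Set.len ((List.range ((0 :: path.flatten).length + 1)).foldl
      (fun vis _ => sweepB (buildGraphA path) (buildCondsA order) (0 :: path.flatten) vis)
      PySem.Set.empty) == n)
  unfold PySem.Set.len
  rw [hlen]
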